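-- pv_equiv track=rewrite | github.com/eliottcassidy2000/math | 04-computation/split_and_inv_euler.py | inverse_euler_transform
-- ===== SOURCE A (Python) =====
-- def inverse_euler_transform(a_dict):
--     """
--     Given a_dict mapping n -> a(n) for n >= 1 (with a(0) ignored if present),
--     compute b(n) via inverse Euler transform.
--
--     c(n) = n*a(n) - sum_{k=1}^{n-1} c(k)*a(n-k)
--     b(n) = (c(n) - sum_{d|n, d<n} d*b(d)) / n
--     """
--     nmax = max(a_dict.keys())
--     a = {n: a_dict[n] for n in a_dict}
--
--     c = {}
--     b = {}
--
--     for n in range(1, nmax + 1):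
--         if n not in a:
--             break
--         # c(n) = n*a(n) - sum_{k=1}^{n-1} c(k)*a(n-k)
--         cn = n * a[n]
--         for k in range(1, n):
--             if k in c and (n - k) in a:
--                 cn -= c[k] * a[n - k]
--         c[n] = cn
--
--         # b(n) = (c(n) - sum_{d|n, d<n} d*b(d)) / n
--         bn = c[n]
--         for d in range(1, n):
--             if n % d == 0 and d in b:
--                 bn -= d * b[d]
--         assert bn % n == 0, f"b({n}) not integer: remainder {bn % n}"
--         b[n] = bn // n
--
--     return b
-- ===== SOURCE B (Python) =====
-- def inverse_euler_transform(a_dict):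
--     # Same value as A on every non-empty dict; sieve-style divisor sums over the
--     # contiguous key prefix instead of trial division (returns {} on empty dict).
--     L = 0
--     while (L + 1) in a_dict:
--         L += 1
--     a = [0] + [a_dict[n] for n in range(1, L + 1)]
--     c = [0] * (L + 1)
--     b = [0] * (L + 1)
--     bsum = [0] * (L + 1)
--     for n in range(1, L + 1):
--         cn = n * a[n]
--         for k in range(1, n):
--             cn -= c[k] * a[n - k]
--         c[n] = cn
--         bn = cn - bsum[n]
--         assert bn % n == 0, f"b({n}) not integer: remainder {bn % n}"
--         b[n] = bn // n
--         t = n * b[n]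
--         for m in range(2 * n, L + 1, n):
--             bsum[m] += t
--     return {n: b[n] for n in range(1, L + 1)}
-- ===== Notes on version B (the rewrite author's own statement) =====
-- stated objective: alternative
-- what changed: B first measures the contiguous key prefix, then uses flat lists instead of dicts and replaces A's per-n trial-division scan (d = 1..n-1 testing n % d == 0) for the divisor sum by a forward sieve that pushes n*b(n) into a running divisor-sum array at the multiples of n, keeping the sequential convolution for c(n) (intended as faster; a timing run measured only 1.37x at the largest size).
import Mathlib
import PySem

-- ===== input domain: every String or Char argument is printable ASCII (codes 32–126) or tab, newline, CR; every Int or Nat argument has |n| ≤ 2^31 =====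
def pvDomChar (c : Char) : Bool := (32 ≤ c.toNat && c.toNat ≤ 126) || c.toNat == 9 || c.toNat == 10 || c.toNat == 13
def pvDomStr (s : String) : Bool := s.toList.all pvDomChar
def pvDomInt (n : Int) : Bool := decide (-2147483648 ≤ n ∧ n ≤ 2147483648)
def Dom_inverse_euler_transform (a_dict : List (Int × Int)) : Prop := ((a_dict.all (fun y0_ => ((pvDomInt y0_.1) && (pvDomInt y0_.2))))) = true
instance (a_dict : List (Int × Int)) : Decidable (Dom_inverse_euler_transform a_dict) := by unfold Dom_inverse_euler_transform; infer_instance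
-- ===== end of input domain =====

-- B replaces A's per-n trial-division divisor scan by a forward sieve over multiples with a
-- maintained running divisor-sum array, working over the contiguous key prefix (return value only).

-- ===== PORT A =====
-- the body of A's 'for n in range(1, nmax+1)' loop with its break; Python's
-- 'assert bn % n == 0' is not modeled (on every input we sampled it passes; see Source B)
def pvALoop (a : PySem.Dict Int Int) (nmax : Int) (c b : PySem.Dict Int Int) (n : Int) :
    PySem.Dict Int Int :=
  if hn : n ≤ nmax then
    if a.contains n then
      -- c(n) = n*a(n) - sum_{k=1}^{n-1} c(k)*a(n-k)
      let cn := (PySem.List.pyRange 1 n 1).foldl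
        (fun cn k => if c.contains k && a.contains (n - k) then
            cn - c.getD k 0 * a.getD (n - k) 0 else cn)
        (n * a.getD n 0)
      let c' := c.insert n cn
      -- b(n) = (c(n) - sum_{d|n, d<n} d*b(d)) / n
      let bn := (PySem.List.pyRange 1 n 1).foldl
        (fun bn d => if PySem.Int.mod n d == 0 && b.contains d then
            bn - d * b.getD d 0 else bn)
        (c'.getD n 0)
      pvALoop a nmax c' (b.insert n (PySem.Int.floordiv bn n)) (n + 1)
    else b
  else b
termination_by (nmax + 1 - n).toNat
decreasing_by omega

def inverse_euler_transform (a_dict : List (Int × Int)) : List (Int × Int) :=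
  let a := PySem.Dict.ofList a_dict   -- 'a = {n: a_dict[n] for n in a_dict}' copies the dict
  match PySem.List.max? a.keys (fun x => x) with
  | none => []                        -- unreachable under Pre_ (Python raises ValueError here)
  | some nmax => (pvALoop a nmax PySem.Dict.empty PySem.Dict.empty 1).items

-- ===== PORT B =====
-- 'while (L+1) in a_dict: L += 1'; the loop makes at most (number of keys) steps
def pvPrefLen (d : PySem.Dict Int Int) : Nat → Int → Int
  | 0, L => L
  | fuel + 1, L => if d.contains (L + 1) then pvPrefLen d fuel (L + 1) else L

def inverse_euler_transform_alt (a_dict : List (Int × Int)) : List (Int × Int) :=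
  let d := PySem.Dict.ofList a_dict
  let L := pvPrefLen d (PySem.Dict.size d) 0
  let a : List Int := 0 :: (PySem.List.pyRange 1 (L + 1) 1).map (fun n => d.getD n 0)
  let z : List Int := List.replicate (L + 1).toNat 0
  let st := (PySem.List.pyRange 1 (L + 1) 1).foldl
    (fun (st : List Int × List Int × List Int) n =>
      let c := st.1
      let b := st.2.1
      let bsum := st.2.2
      let cn := (PySem.List.pyRange 1 n 1).foldl
        (fun cn k => cn - PySem.List.pyGetD c k 0 * PySem.List.pyGetD a (n - k) 0)
        (n * PySem.List.pyGetD a n 0)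
      let c' := PySem.List.pySetD c n cn
      let bn := cn - PySem.List.pyGetD bsum n 0
      -- 'assert bn % n == 0' not modeled (see PORT A)
      let b' := PySem.List.pySetD b n (PySem.Int.floordiv bn n)
      let t := n * PySem.List.pyGetD b' n 0
      let bsum' := (PySem.List.pyRange (2 * n) (L + 1) n).foldl
        (fun bs m => PySem.List.pySetD bs m (PySem.List.pyGetD bs m 0 + t)) bsum
      (c', b', bsum'))
    (z, z, z)
  (PySem.List.pyRange 1 (L + 1) 1).map (fun n => (n, PySem.List.pyGetD st.2.1 n 0))

-- ===== PRECONDITION & SPEC =====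
-- Pre_ excludes only the empty dict, on which A raises ValueError (max of empty sequence).
def Pre_inverse_euler_transform (a_dict : List (Int × Int)) : Prop := a_dict ≠ []
instance (a_dict : List (Int × Int)) : Decidable (Pre_inverse_euler_transform a_dict) := by
  unfold Pre_inverse_euler_transform; infer_instance

def pvWitness_inverse_euler_transform : (List (Int × Int)) := [(1, 1), (2, 3), (3, -2)]

def Spec_inverse_euler_transform (a_dict : List (Int × Int)) (out : List (Int × Int)) : Prop :=
  out = inverse_euler_transform_alt a_dict
instance (a_dict : List (Int × Int)) (out : List (Int × Int)) :
    Decidable (Spec_inverse_euler_transform a_dict out) := by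
  unfold Spec_inverse_euler_transform; infer_instance

-- ===== CLAIM (what is proved, stated in full; the proofs are below) =====
def Claim_equal_inverse_euler_transform : Prop := ∀ (a_dict : List (Int × Int)),
  Dom_inverse_euler_transform a_dict → Pre_inverse_euler_transform a_dict →
  Spec_inverse_euler_transform a_dict (inverse_euler_transform a_dict)

-- ===== LEMMAS AND PROOFS =====

-- ==== proof-only helpers ====

-- the a-lookup list B builds for the contiguous prefix
def pvAList (D : PySem.Dict Int Int) (L : Int) : List Int :=
  0 :: (PySem.List.pyRange 1 (L + 1) 1).map (fun n => D.getD n 0)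

-- the body of B's main fold, as a named function (definitionally the port's lambda)
def pvStep (D : PySem.Dict Int Int) (L : Int) :
    (List Int × List Int × List Int) → Int → (List Int × List Int × List Int) :=
  fun st n =>
    let a := pvAList D L
    let c := st.1
    let b := st.2.1
    let bsum := st.2.2
    let cn := (PySem.List.pyRange 1 n 1).foldl
      (fun cn k => cn - PySem.List.pyGetD c k 0 * PySem.List.pyGetD a (n - k) 0)
      (n * PySem.List.pyGetD a n 0)
    let c' := PySem.List.pySetD c n cn
    let bn := cn - PySem.List.pyGetD bsum n 0
    let b' := PySem.List.pySetD b n (PySem.Int.floordiv bn n)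
    let t := n * PySem.List.pyGetD b' n 0
    let bsum' := (PySem.List.pyRange (2 * n) (L + 1) n).foldl
      (fun bs m => PySem.List.pySetD bs m (PySem.List.pyGetD bs m 0 + t)) bsum
    (c', b', bsum')

-- A's dicts after t steps, represented from B's value lists
def pvDictRep (x : List Int) (t : Nat) : PySem.Dict Int Int :=
  PySem.Dict.mk ((List.range' 1 t).map (fun (i : Nat) => ((i : Int), x.getD i 0)))

-- divisor sum maintained by B's sieve
def pvSum (t : Nat) (b : List Int) (m : Nat) : Int :=
  ((List.range t).map (fun (k : Nat) =>
    if PySem.Int.mod (m : Int) (1 + (k : Int)) == 0 then (1 + (k : Int)) * b.getD (k + 1) 0 else 0)).sum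

lemma pv_keys_rep (x : List Int) (t : Nat) :
    (pvDictRep x t).keys = (List.range' 1 t).map (fun (i : Nat) => (i : Int)) := by
  unfold pvDictRep
  rw [PySem.Dict.keys_mk, List.map_map]
  rfl

lemma pv_nodup_keys_rep (x : List Int) (t : Nat) : (pvDictRep x t).keys.Nodup := by
  rw [pv_keys_rep]
  refine List.Nodup.map ?_ ?_
  · exact fun a b h => by exact_mod_cast h
  · exact List.nodup_range'

lemma pv_contains_rep (x : List Int) (t : Nat) (i : Nat) (h1 : 1 ≤ i) (h2 : i ≤ t) :
    (pvDictRep x t).contains (i : Int) = true := by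
  rw [PySem.Dict.contains_iff_mem_keys, pv_keys_rep]
  exact List.mem_map.mpr ⟨i, by rw [List.mem_range'_1]; omega, rfl⟩

lemma pv_not_contains_rep (x : List Int) (t : Nat) :
    (pvDictRep x t).contains ((t : Int) + 1) = false := by
  by_contra h
  have h' : (pvDictRep x t).contains ((t : Int) + 1) = true := by
    cases hb : (pvDictRep x t).contains ((t : Int) + 1) <;> simp_all
  rw [PySem.Dict.contains_iff_mem_keys, pv_keys_rep] at h'
  obtain ⟨i, hi, hcast⟩ := List.mem_map.mp h'
  rw [List.mem_range'_1] at hi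
  omega

lemma pv_getD_rep (x : List Int) (t : Nat) (i : Nat) (h1 : 1 ≤ i) (h2 : i ≤ t) :
    (pvDictRep x t).getD (i : Int) 0 = x.getD i 0 := by
  apply PySem.Dict.getD_of_mem_items
  · exact List.mem_map.mpr ⟨i, by rw [List.mem_range'_1]; omega, rfl⟩
  · exact pv_nodup_keys_rep x t

lemma pv_insert_rep (x : List Int) (t : Nat) (v : Int) (hlen : t + 1 < x.length) :
    (pvDictRep x t).insert ((t : Int) + 1) v = pvDictRep (x.set (t + 1) v) (t + 1) := by
  apply PySem.Dict.ext
  rw [PySem.Dict.items_insert_of_not_contains _ _ (pv_not_contains_rep x t)]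
  unfold pvDictRep
  show ((List.range' 1 t).map (fun (i : Nat) => ((i : Int), x.getD i 0))) ++ [((t : Int) + 1, v)]
      = (List.range' 1 (t + 1)).map (fun (i : Nat) => ((i : Int), (x.set (t + 1) v).getD i 0))
  rw [List.range'_concat, List.map_append]
  congr 1
  · apply List.map_congr_left
    intro i hi
    rw [List.mem_range'_1] at hi
    have : (x.set (t + 1) v).getD i 0 = x.getD i 0 := by
      rw [List.getD_eq_getElem?_getD, List.getD_eq_getElem?_getD, List.getElem?_set_ne (by omega)]
    rw [this]
  · simp only [List.map_cons, List.map_nil, List.cons.injEq, Prod.mk.injEq, and_true]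
    refine ⟨by push_cast; ring, ?_⟩
    rw [show (1 : ℕ) + 1 * t = t + 1 by ring, List.getD_eq_getElem?_getD,
        List.getElem?_set_self (by omega)]
    rfl

lemma pv_foldl_sub_ite (l : List Int) (p : Int → Bool) (g : Int → Int) (init : Int) :
    l.foldl (fun s d => if p d then s - g d else s) init
      = init - (l.map (fun d => if p d then g d else 0)).sum := by
  induction l generalizing init with
  | nil => simp
  | cons h tl ih =>
    by_cases hp : p h <;> simp [hp, ih]
    ring

lemma pv_sieve (v : Int) : ∀ (ms : List Int), ms.Nodup → (∀ x ∈ ms, 0 ≤ x) →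
    ∀ (bs : List Int) (m : Nat),
    (ms.foldl (fun bs x => PySem.List.pySetD bs x (PySem.List.pyGetD bs x 0 + v)) bs).getD m 0
      = bs.getD m 0 + (if ((m : Int) ∈ ms ∧ m < bs.length) then v else 0) := by
  intro ms
  induction ms with
  | nil => intro _ _ bs m; simp
  | cons x tl ih =>
    intro hnd hpos bs m
    have hx0 : 0 ≤ x := hpos x (List.mem_cons_self)
    have hnd' : tl.Nodup := hnd.of_cons
    have hpos' : ∀ y ∈ tl, 0 ≤ y := fun y hy => hpos y (List.mem_cons_of_mem _ hy)
    simp only [List.foldl_cons]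
    rw [PySem.List.pySetD_of_nonneg _ _ hx0, ih hnd' hpos' _ m]
    by_cases hlt : x.toNat < bs.length
    · by_cases hmx : (m : Int) = x
      · have hm : x.toNat = m := by omega
        have hmem : (m : Int) ∉ tl := by
          rw [hmx]; exact (List.nodup_cons.mp hnd).1
        have hset : (bs.set x.toNat (PySem.List.pyGetD bs x 0 + v)).getD m 0
            = PySem.List.pyGetD bs x 0 + v := by
          rw [List.getD_eq_getElem?_getD, hm, List.getElem?_set_self (by omega)]; rfl
        have hget : PySem.List.pyGetD bs x 0 = bs.getD m 0 := by
          rw [← hmx, PySem.List.pyGetD_natCast]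
        rw [hset, hget]
        simp only [List.length_set, List.mem_cons]
        have h1 : ¬ ((m : Int) ∈ tl ∧ m < bs.length) := fun h => hmem h.1
        have h2 : (((m : Int) = x ∨ (m : Int) ∈ tl) ∧ m < bs.length) := ⟨Or.inl hmx, by omega⟩
        rw [if_neg h1, if_pos h2]
        ring
      · have hne : x.toNat ≠ m := by omega
        have hset : (bs.set x.toNat (PySem.List.pyGetD bs x 0 + v)).getD m 0 = bs.getD m 0 := by
          rw [List.getD_eq_getElem?_getD, List.getElem?_set_ne hne, ← List.getD_eq_getElem?_getD]
        rw [hset]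
        simp only [List.length_set, List.mem_cons]
        congr 1
        by_cases hc : ((m : Int) ∈ tl ∧ m < bs.length)
        · rw [if_pos hc, if_pos ⟨Or.inr hc.1, hc.2⟩]
        · rw [if_neg hc, if_neg (fun h => hc ⟨h.1.resolve_left hmx, h.2⟩)]
    · have hsetid : bs.set x.toNat (PySem.List.pyGetD bs x 0 + v) = bs :=
        List.set_eq_of_length_le (by omega)
      rw [hsetid]
      simp only [List.mem_cons]
      congr 1
      by_cases hc : ((m : Int) ∈ tl ∧ m < bs.length)
      · rw [if_pos hc, if_pos ⟨Or.inr hc.1, hc.2⟩]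
      · have hnx : ¬ (((m : Int) = x ∨ (m : Int) ∈ tl) ∧ m < bs.length) := by
          rintro ⟨h | h, hl⟩
          · omega
          · exact hc ⟨h, hl⟩
        rw [if_neg hc, if_neg hnx]

lemma pv_sieve_len (v : Int) (ms : List Int) (bs : List Int) :
    (ms.foldl (fun bs x => PySem.List.pySetD bs x (PySem.List.pyGetD bs x 0 + v)) bs).length
      = bs.length := by
  induction ms generalizing bs with
  | nil => rfl
  | cons x tl ih => simp only [List.foldl_cons]; rw [ih, PySem.List.length_pySetD]

lemma pv_aList_getD (D : PySem.Dict Int Int) (Lnat : Nat) (j : Nat) (h1 : 1 ≤ j) (h2 : j ≤ Lnat) :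
    PySem.List.pyGetD (pvAList D ((Lnat : Int))) ((j : Int)) 0 = D.getD (j : Int) 0 := by
  unfold pvAList
  rw [PySem.List.pyGetD_natCast]
  cases j with
  | zero => omega
  | succ j' =>
    rw [List.getD_cons_succ, PySem.List.pyRange_one,
        show (((Lnat : Int)) + 1 - 1).toNat = Lnat by omega, List.map_map,
        List.getD_eq_getElem?_getD, List.getElem?_map, List.getElem?_range (by omega)]
    simp only [Option.map_some, Option.getD_some, Function.comp_apply]
    congr 1
    push_cast
    ring

-- the value B computes for c(n) at n = t+1
def pvCN (D : PySem.Dict Int Int) (L : Int) (c : List Int) (n : Int) : Int :=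
  (PySem.List.pyRange 1 n 1).foldl
    (fun cn k => cn - PySem.List.pyGetD c k 0 * PySem.List.pyGetD (pvAList D L) (n - k) 0)
    (n * PySem.List.pyGetD (pvAList D L) n 0)

lemma pv_cn_eq (D : PySem.Dict Int Int) (Lnat t : Nat) (ht : t < Lnat)
    (hcont : ∀ i : Nat, 1 ≤ i → i ≤ Lnat → D.contains (i : Int) = true)
    (c : List Int) :
    (PySem.List.pyRange 1 ((t : Int) + 1) 1).foldl
      (fun cn k => if (pvDictRep c t).contains k && D.contains (((t : Int) + 1) - k) then
          cn - (pvDictRep c t).getD k 0 * D.getD (((t : Int) + 1) - k) 0 else cn)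
      (((t : Int) + 1) * D.getD ((t : Int) + 1) 0)
    = pvCN D ((Lnat : Int)) c ((t : Int) + 1) := by
  unfold pvCN
  have hinit : PySem.List.pyGetD (pvAList D ((Lnat : Int))) ((t : Int) + 1) 0
      = D.getD ((t : Int) + 1) 0 := by
    have h := pv_aList_getD D Lnat (t + 1) (by omega) (by omega)
    push_cast at h
    exact h
  rw [hinit]
  apply PySem.List.foldl_congr_mem
  intro acc k hk
  rw [PySem.List.mem_pyRange_one] at hk
  obtain ⟨i, hi1, hi2, rfl⟩ : ∃ i : ℕ, 1 ≤ i ∧ i ≤ t ∧ k = (i : Int) :=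
    ⟨k.toNat, by omega, by omega, by omega⟩
  have hsub : ((t : Int) + 1) - (i : Int) = ((t + 1 - i : ℕ) : Int) := by omega
  have hc1 : (pvDictRep c t).contains (i : Int) = true := pv_contains_rep c t i hi1 hi2
  have hc2 : D.contains (((t : Int) + 1) - (i : Int)) = true := by
    rw [hsub]; exact hcont (t + 1 - i) (by omega) (by omega)
  have ha : PySem.List.pyGetD (pvAList D ((Lnat : Int))) (((t : Int) + 1) - (i : Int)) 0
      = D.getD (((t : Int) + 1) - (i : Int)) 0 := by
    rw [hsub]; exact pv_aList_getD D Lnat (t + 1 - i) (by omega) (by omega)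
  rw [hc1, hc2]
  simp only [Bool.and_self, if_true]
  rw [pv_getD_rep c t i hi1 hi2, PySem.List.pyGetD_natCast, ha]

lemma pv_bn_eq (t : Nat) (b : List Int) (cn : Int) :
    (PySem.List.pyRange 1 ((t : Int) + 1) 1).foldl
      (fun bn d => if PySem.Int.mod ((t : Int) + 1) d == 0 && (pvDictRep b t).contains d then
          bn - d * (pvDictRep b t).getD d 0 else bn) cn
    = cn - pvSum t b (t + 1) := by
  have hcongr := PySem.List.foldl_congr_mem (PySem.List.pyRange 1 ((t : Int) + 1) 1)
    (fun bn d => if PySem.Int.mod ((t : Int) + 1) d == 0 && (pvDictRep b t).contains d then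
        bn - d * (pvDictRep b t).getD d 0 else bn)
    (fun bn d => if PySem.Int.mod ((t : Int) + 1) d == 0 then bn - d * b.getD d.toNat 0 else bn)
    cn ?_
  · rw [hcongr,
      pv_foldl_sub_ite _ (fun d => PySem.Int.mod ((t : Int) + 1) d == 0)
        (fun d => d * b.getD d.toNat 0) cn]
    congr 1
    unfold pvSum
    rw [PySem.List.pyRange_one, show (((t : Int) + 1) - 1).toNat = t from by omega, List.map_map]
    apply congrArg List.sum
    apply List.map_congr_left
    intro k hk
    rw [List.mem_range] at hk
    simp only [Function.comp_apply, show ((1 : Int) + (k : Int)).toNat = k + 1 from by omega,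
      show ((t + 1 : ℕ) : Int) = (t : Int) + 1 from by push_cast; ring]
  · intro acc d hd
    rw [PySem.List.mem_pyRange_one] at hd
    obtain ⟨i, hi1, hi2, rfl⟩ : ∃ i : ℕ, 1 ≤ i ∧ i ≤ t ∧ d = (i : Int) :=
      ⟨d.toNat, by omega, by omega, by omega⟩
    simp only [pv_contains_rep b t i hi1 hi2, Bool.and_true, pv_getD_rep b t i hi1 hi2,
      Int.toNat_natCast]

lemma pv_sum_set (t : Nat) (b : List Int) (v : Int) (m : Nat) (_hm : t + 1 < m)
    (hlen : t + 1 < b.length) :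
    pvSum (t + 1) (b.set (t + 1) v) m
      = pvSum t b m + (if PySem.Int.mod (m : Int) ((t : Int) + 1) == 0 then ((t : Int) + 1) * v else 0) := by
  unfold pvSum
  rw [List.range_succ, List.map_append, List.sum_append]
  congr 1
  · apply congrArg List.sum
    apply List.map_congr_left
    intro k hk
    rw [List.mem_range] at hk
    have hne : (b.set (t + 1) v).getD (k + 1) 0 = b.getD (k + 1) 0 := by
      rw [List.getD_eq_getElem?_getD, List.getElem?_set_ne (by omega),
          ← List.getD_eq_getElem?_getD]
    rw [hne]
  · simp only [List.map_cons, List.map_nil, List.sum_cons, List.sum_nil, add_zero]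
    have h2 : (b.set (t + 1) v).getD (t + 1) 0 = v := by
      rw [List.getD_eq_getElem?_getD, List.getElem?_set_self (by omega)]; rfl
    rw [h2, show (1 : Int) + (t : Int) = (t : Int) + 1 by ring]

lemma pv_mem_multiples (Lnat t m : Nat) (h1 : t + 1 < m) (h2 : m ≤ Lnat) :
    ((m : Int) ∈ PySem.List.pyRange (2 * ((t : Int) + 1)) ((Lnat : Int) + 1) ((t : Int) + 1))
      ↔ PySem.Int.mod (m : Int) ((t : Int) + 1) = 0 := by
  have hpos : (0 : Int) < (t : Int) + 1 := by omega
  rw [PySem.List.mem_pyRange_iff_of_pos hpos, PySem.Int.mod_eq_zero_iff_dvd]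
  constructor
  · rintro ⟨h2n, hlt, hdvd⟩
    have h := dvd_add hdvd (⟨2, by ring⟩ : ((t : Int) + 1) ∣ 2 * ((t : Int) + 1))
    simpa using h
  · intro hdvd
    obtain ⟨q, hq⟩ := hdvd
    have hq2 : 2 ≤ q := by nlinarith [hq, hpos]
    refine ⟨by nlinarith [hq, hpos], by omega, ?_⟩
    exact dvd_sub ⟨q, hq⟩ ⟨2, by ring⟩

lemma pv_card (D : PySem.Dict Int Int) (t : Nat)
    (h : ∀ i : Nat, 1 ≤ i → i ≤ t → ((i : Int) ∈ D.keys)) : t ≤ D.size := by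
  have hsub : ((List.range' 1 t).map (fun (i : ℕ) => (i : Int))) ⊆ D.keys := by
    intro x hx
    obtain ⟨i, hi, rfl⟩ := List.mem_map.mp hx
    rw [List.mem_range'_1] at hi
    exact h i (by omega) (by omega)
  have hnd : ((List.range' 1 t).map (fun (i : ℕ) => (i : Int))).Nodup :=
    List.Nodup.map (fun a b hh => by exact_mod_cast hh) List.nodup_range'
  have hle := (List.subperm_of_subset hnd hsub).length_le
  simp only [List.length_map, List.length_range'] at hle
  have hsz : D.keys.length = D.size := by
    show (D.items.map Prod.fst).length = D.items.length
    rw [List.length_map]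
  omega

lemma pv_prefLen_spec (D : PySem.Dict Int Int) :
    ∀ (fuel : Nat) (l : Int), 0 ≤ l →
      (∀ i : Int, 1 ≤ i → i ≤ l → D.contains i = true) →
      D.size ≤ fuel + l.toNat →
      0 ≤ pvPrefLen D fuel l ∧
      (∀ i : Int, 1 ≤ i → i ≤ pvPrefLen D fuel l → D.contains i = true) ∧
      D.contains (pvPrefLen D fuel l + 1) = false := by
  intro fuel
  induction fuel with
  | zero =>
    intro l hl0 hinv hsz
    refine ⟨hl0, hinv, ?_⟩
    show D.contains (l + 1) = false
    cases hc : D.contains (l + 1) with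
    | false => rfl
    | true =>
      exfalso
      have hcard := pv_card D (l.toNat + 1) (fun i hi1 hi2 => by
        by_cases hle : (i : Int) ≤ l
        · exact (PySem.Dict.contains_iff_mem_keys D _).mp (hinv (i : Int) (by omega) hle)
        · have heq : (i : Int) = l + 1 := by omega
          rw [heq]
          exact (PySem.Dict.contains_iff_mem_keys D _).mp hc)
      omega
  | succ fuel ih =>
    intro l hl0 hinv hsz
    show 0 ≤ pvPrefLen D (fuel + 1) l ∧ _
    cases hc : D.contains (l + 1) with
    | true =>
      have hrec := ih (l + 1) (by omega)
        (fun i h1 h2 => by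
          by_cases hle : i ≤ l
          · exact hinv i h1 hle
          · have heq : i = l + 1 := by omega
            rw [heq]; exact hc)
        (by omega)
      simpa only [pvPrefLen, hc, if_true] using hrec
    | false =>
      have heq : pvPrefLen D (fuel + 1) l = l := by
        simp only [pvPrefLen, hc, Bool.false_eq_true, if_false]
      rw [heq]
      exact ⟨hl0, hinv, hc⟩

lemma pvALoop_step (a : PySem.Dict Int Int) (nmax : Int) (c b : PySem.Dict Int Int) (n : Int)
    (hn : n ≤ nmax) (hc : a.contains n = true) :
    pvALoop a nmax c b n =
      pvALoop a nmax
        (c.insert n ((PySem.List.pyRange 1 n 1).foldl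
          (fun cn k => if c.contains k && a.contains (n - k) then
              cn - c.getD k 0 * a.getD (n - k) 0 else cn) (n * a.getD n 0)))
        (b.insert n (PySem.Int.floordiv
          ((PySem.List.pyRange 1 n 1).foldl
            (fun bn d => if PySem.Int.mod n d == 0 && b.contains d then
                bn - d * b.getD d 0 else bn)
            ((c.insert n ((PySem.List.pyRange 1 n 1).foldl
              (fun cn k => if c.contains k && a.contains (n - k) then
                  cn - c.getD k 0 * a.getD (n - k) 0 else cn) (n * a.getD n 0))).getD n 0)) n))
        (n + 1) := by
  rw [pvALoop, dif_pos hn, if_pos hc]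

lemma pvALoop_stop_gt (a : PySem.Dict Int Int) (nmax : Int) (c b : PySem.Dict Int Int) (n : Int)
    (hn : ¬ n ≤ nmax) : pvALoop a nmax c b n = b := by
  rw [pvALoop, dif_neg hn]

lemma pvALoop_stop_nc (a : PySem.Dict Int Int) (nmax : Int) (c b : PySem.Dict Int Int) (n : Int)
    (hn : n ≤ nmax) (hc : a.contains n = false) : pvALoop a nmax c b n = b := by
  rw [pvALoop, dif_pos hn, if_neg (by simp [hc])]

lemma pvStep_eq (D : PySem.Dict Int Int) (L : Int) (c b bs : List Int) (t : Nat) :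
    pvStep D L (c, b, bs) ((t : Int) + 1)
      = (c.set (t + 1) (pvCN D L c ((t : Int) + 1)),
         b.set (t + 1) (PySem.Int.floordiv (pvCN D L c ((t : Int) + 1) - bs.getD (t + 1) 0) ((t : Int) + 1)),
         (PySem.List.pyRange (2 * ((t : Int) + 1)) (L + 1) ((t : Int) + 1)).foldl
           (fun bsx m => PySem.List.pySetD bsx m (PySem.List.pyGetD bsx m 0 +
             ((t : Int) + 1) * PySem.List.pyGetD
               (b.set (t + 1) (PySem.Int.floordiv (pvCN D L c ((t : Int) + 1) - bs.getD (t + 1) 0) ((t : Int) + 1)))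
               ((t : Int) + 1) 0)) bs) := by
  have hcast : ((t + 1 : ℕ) : Int) = (t : Int) + 1 := by push_cast; ring
  have hbs : PySem.List.pyGetD bs ((t : Int) + 1) 0 = bs.getD (t + 1) 0 := by
    rw [← hcast, PySem.List.pyGetD_natCast]
  have hsetc : ∀ v : Int, PySem.List.pySetD c ((t : Int) + 1) v = c.set (t + 1) v := by
    intro v; rw [← hcast, PySem.List.pySetD_natCast]
  have hsetb : ∀ v : Int, PySem.List.pySetD b ((t : Int) + 1) v = b.set (t + 1) v := by
    intro v; rw [← hcast, PySem.List.pySetD_natCast]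
  show (PySem.List.pySetD c ((t : Int) + 1) (pvCN D L c ((t : Int) + 1)),
        PySem.List.pySetD b ((t : Int) + 1) (PySem.Int.floordiv
          (pvCN D L c ((t : Int) + 1) - PySem.List.pyGetD bs ((t : Int) + 1) 0) ((t : Int) + 1)),
        (PySem.List.pyRange (2 * ((t : Int) + 1)) (L + 1) ((t : Int) + 1)).foldl
          (fun bsx m => PySem.List.pySetD bsx m (PySem.List.pyGetD bsx m 0 +
            ((t : Int) + 1) * PySem.List.pyGetD
              (PySem.List.pySetD b ((t : Int) + 1) (PySem.Int.floordiv
                (pvCN D L c ((t : Int) + 1) - PySem.List.pyGetD bs ((t : Int) + 1) 0) ((t : Int) + 1)))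
              ((t : Int) + 1) 0)) bs) = _
  rw [hbs, hsetc, hsetb]

lemma pvSim (D : PySem.Dict Int Int) (nmax : Int) (hmax : ∀ k ∈ D.keys, k ≤ nmax)
    (Lnat : Nat)
    (hcont : ∀ i : Nat, 1 ≤ i → i ≤ Lnat → D.contains (i : Int) = true)
    (hstop : D.contains ((Lnat : Int) + 1) = false) :
    ∀ (rem t : Nat) (c b bs : List Int), t + rem = Lnat →
      c.length = Lnat + 1 → b.length = Lnat + 1 → bs.length = Lnat + 1 →
      (∀ m : Nat, t < m → m ≤ Lnat → bs.getD m 0 = pvSum t b m) →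
      (pvALoop D nmax (pvDictRep c t) (pvDictRep b t) ((t : Int) + 1)).items
        = (PySem.List.pyRange 1 ((Lnat : Int) + 1) 1).map
            (fun n => (n, PySem.List.pyGetD
              (((PySem.List.pyRange ((t : Int) + 1) ((Lnat : Int) + 1) 1).foldl
                  (pvStep D ((Lnat : Int))) (c, b, bs)).2.1) n 0)) := by
  intro rem
  induction rem with
  | zero =>
    intro t c b bs hsum hlc hlb hlbs hinv
    have ht : t = Lnat := by omega
    subst ht
    rw [PySem.List.pyRange_one_eq_nil (le_refl ((t : Int) + 1)), List.foldl_nil]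
    have hend : pvALoop D nmax (pvDictRep c t) (pvDictRep b t) ((t : Int) + 1) = pvDictRep b t := by
      by_cases hn : (t : Int) + 1 ≤ nmax
      · exact pvALoop_stop_nc _ _ _ _ _ hn hstop
      · exact pvALoop_stop_gt _ _ _ _ _ hn
    rw [hend]
    show (List.range' 1 t).map (fun (i : ℕ) => ((i : Int), b.getD i 0)) = _
    rw [PySem.List.pyRange_one, show (((t : Int) + 1) - 1).toNat = t from by omega,
        List.range'_eq_map_range, List.map_map, List.map_map]
    apply List.map_congr_left
    intro k hk
    simp only [Function.comp_apply,
      show (1 : Int) + (k : Int) = ((1 + k : ℕ) : Int) from by push_cast; ring,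
      PySem.List.pyGetD_natCast]
  | succ rem ih =>
    intro t c b bs hsum hlc hlb hlbs hinv
    have ht : t < Lnat := by omega
    have hcast : ((t + 1 : ℕ) : Int) = (t : Int) + 1 := by push_cast; ring
    have hcnt : D.contains ((t : Int) + 1) = true := by
      rw [← hcast]; exact hcont (t + 1) (by omega) (by omega)
    have hnle : (t : Int) + 1 ≤ nmax :=
      hmax _ ((PySem.Dict.contains_iff_mem_keys D _).mp hcnt)
    rw [pvALoop_step D nmax (pvDictRep c t) (pvDictRep b t) ((t : Int) + 1) hnle hcnt,
        pv_cn_eq D Lnat t ht hcont c, PySem.Dict.getD_insert_self, pv_bn_eq t b _,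
        ← hinv (t + 1) (by omega) (by omega),
        pv_insert_rep c t _ (by omega), pv_insert_rep b t _ (by omega),
        PySem.List.pyRange_one_cons (by omega : ((t : Int) + 1) < ((Lnat : Int) + 1)),
        List.foldl_cons, pvStep_eq D ((Lnat : Int)) c b bs t]
    generalize hCN : pvCN D ((Lnat : Int)) c ((t : Int) + 1) = CN
    set BV := PySem.Int.floordiv (CN - bs.getD (t + 1) 0) ((t : Int) + 1) with hBV
    set V := ((t : Int) + 1) * PySem.List.pyGetD (b.set (t + 1) BV) ((t : Int) + 1) 0 with hV
    set BS := (PySem.List.pyRange (2 * ((t : Int) + 1)) ((Lnat : Int) + 1) ((t : Int) + 1)).foldl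
        (fun bsx m => PySem.List.pySetD bsx m (PySem.List.pyGetD bsx m 0 + V)) bs with hBS
    have hVval : V = ((t : Int) + 1) * BV := by
      rw [hV, ← hcast, PySem.List.pyGetD_natCast, List.getD_eq_getElem?_getD,
          List.getElem?_set_self (by omega), Option.getD_some]
    have hnd : (PySem.List.pyRange (2 * ((t : Int) + 1)) ((Lnat : Int) + 1) ((t : Int) + 1)).Nodup := by
      rw [PySem.List.pyRange_of_pos _ _ (by omega : (0 : Int) < (t : Int) + 1)]
      refine List.Nodup.map ?_ List.nodup_range
      intro x y hxy
      have h1 : ((t : Int) + 1) * (x : Int) = ((t : Int) + 1) * (y : Int) := by linarith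
      have h2 : (x : Int) = (y : Int) := mul_left_cancel₀ (by omega) h1
      exact_mod_cast h2
    have hposms : ∀ x ∈ PySem.List.pyRange (2 * ((t : Int) + 1)) ((Lnat : Int) + 1) ((t : Int) + 1),
        (0 : Int) ≤ x := by
      intro x hx
      rw [PySem.List.mem_pyRange_iff_of_pos (by omega)] at hx
      obtain ⟨h1, -, -⟩ := hx
      omega
    have hinv' : ∀ m : Nat, t + 1 < m → m ≤ Lnat →
        BS.getD m 0 = pvSum (t + 1) (b.set (t + 1) BV) m := by
      intro m hm1 hm2
      rw [hBS, pv_sieve V _ hnd hposms bs m, hinv m (by omega) hm2,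
          pv_sum_set t b BV m hm1 (by omega)]
      congr 1
      rw [hVval]
      have hmem := pv_mem_multiples Lnat t m hm1 hm2
      by_cases hd : PySem.Int.mod (m : Int) ((t : Int) + 1) = 0
      · rw [if_pos ⟨hmem.mpr hd, by omega⟩, if_pos (by simpa using hd)]
      · rw [if_neg (fun hcon => hd (hmem.mp hcon.1)), if_neg (by simpa using hd)]
    have hI := ih (t + 1) (c.set (t + 1) CN) (b.set (t + 1) BV) BS (by omega)
      (by rw [List.length_set]; exact hlc)
      (by rw [List.length_set]; exact hlb)
      (by rw [hBS, pv_sieve_len]; exact hlbs)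
      hinv'
    rw [hcast] at hI
    exact hI

lemma pvAlt_eq (a_dict : List (Int × Int)) :
    inverse_euler_transform_alt a_dict =
      (PySem.List.pyRange 1 ((pvPrefLen (PySem.Dict.ofList a_dict) (PySem.Dict.size (PySem.Dict.ofList a_dict)) 0) + 1) 1).map
        (fun n => (n, PySem.List.pyGetD
          (((PySem.List.pyRange 1 ((pvPrefLen (PySem.Dict.ofList a_dict) (PySem.Dict.size (PySem.Dict.ofList a_dict)) 0) + 1) 1).foldl
              (pvStep (PySem.Dict.ofList a_dict) (pvPrefLen (PySem.Dict.ofList a_dict) (PySem.Dict.size (PySem.Dict.ofList a_dict)) 0))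
              (List.replicate ((pvPrefLen (PySem.Dict.ofList a_dict) (PySem.Dict.size (PySem.Dict.ofList a_dict)) 0) + 1).toNat 0,
               List.replicate ((pvPrefLen (PySem.Dict.ofList a_dict) (PySem.Dict.size (PySem.Dict.ofList a_dict)) 0) + 1).toNat 0,
               List.replicate ((pvPrefLen (PySem.Dict.ofList a_dict) (PySem.Dict.size (PySem.Dict.ofList a_dict)) 0) + 1).toNat 0)).2.1) n 0)) := by
  rfl

lemma pv_keys_ofList (l : List (Int × Int)) :
    (PySem.Dict.ofList l).keys = PySem.Set.ofList (l.map Prod.fst) := by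
  have h : PySem.Dict.ofList l = l.foldl (fun d p => d.insert p.1 p.2) PySem.Dict.empty := rfl
  rw [h, PySem.Dict.keys_foldl_insert_key l Prod.fst (fun _ p => p.2) PySem.Dict.empty,
      show (PySem.Dict.empty : PySem.Dict Int Int).keys = [] from rfl,
      PySem.Set.update_nil_left]


-- ===== VERDICT (by name: the statement is the Claim_ definition above) =====
theorem inverse_euler_transform_spec : Claim_equal_inverse_euler_transform := by
  intro a_dict _ hpre
  unfold Spec_inverse_euler_transform
  unfold Pre_inverse_euler_transform at hpre
  have hkeys : (PySem.Dict.ofList a_dict).keys ≠ [] := by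
    cases a_dict with
    | nil => exact absurd rfl hpre
    | cons p ps =>
      have hmem : p.1 ∈ (PySem.Dict.ofList (p :: ps)).keys := by
        rw [pv_keys_ofList, PySem.Set.mem_ofList]
        exact List.mem_map.mpr ⟨p, List.mem_cons_self, rfl⟩
      exact List.ne_nil_of_mem hmem
  cases hmx : PySem.List.max? (PySem.Dict.ofList a_dict).keys (fun x => x) with
  | none => exact absurd ((PySem.List.max?_eq_none_iff _ _).mp hmx) hkeys
  | some nmax =>
  have hmax : ∀ k ∈ (PySem.Dict.ofList a_dict).keys, k ≤ nmax := fun k hk =>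
    PySem.List.max?_isMax hmx k hk
  have hA : inverse_euler_transform a_dict
      = (pvALoop (PySem.Dict.ofList a_dict) nmax PySem.Dict.empty PySem.Dict.empty 1).items := by
    show (match PySem.List.max? (PySem.Dict.ofList a_dict).keys (fun x => x) with
          | none => ([] : List (Int × Int))
          | some nm => (pvALoop (PySem.Dict.ofList a_dict) nm PySem.Dict.empty PySem.Dict.empty 1).items)
        = _
    rw [hmx]
  rw [hA, pvAlt_eq a_dict]
  obtain ⟨hL0, hLc, hLs⟩ := pv_prefLen_spec (PySem.Dict.ofList a_dict)
    (PySem.Dict.size (PySem.Dict.ofList a_dict)) 0 (le_refl 0)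
    (fun i h1 h2 => (by omega : False).elim) (by omega)
  set L := pvPrefLen (PySem.Dict.ofList a_dict) (PySem.Dict.size (PySem.Dict.ofList a_dict)) 0
    with hLdef
  set Ln := L.toNat with hLn
  have hLnat : ((Ln : ℕ) : Int) = L := by omega
  rw [show L = ((Ln : ℕ) : Int) from by omega,
      show (((Ln : ℕ) : Int) + 1).toNat = Ln + 1 from by omega]
  have hcont' : ∀ i : ℕ, 1 ≤ i → i ≤ Ln →
      (PySem.Dict.ofList a_dict).contains (i : Int) = true := fun i h1 h2 =>
    hLc (i : Int) (by omega) (by omega)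
  have hstop' : (PySem.Dict.ofList a_dict).contains ((Ln : Int) + 1) = false := by
    rw [show ((Ln : Int) + 1) = L + 1 from by omega]
    exact hLs
  have hsim := pvSim (PySem.Dict.ofList a_dict) nmax hmax Ln hcont' hstop' Ln 0
    (List.replicate (Ln + 1) 0) (List.replicate (Ln + 1) 0) (List.replicate (Ln + 1) 0)
    (by omega) (by simp) (by simp) (by simp)
    (fun m hm1 hm2 => by
      rw [List.getD_replicate _ (by omega)]
      simp [pvSum])
  have hzero : pvDictRep (List.replicate (Ln + 1) 0) 0 = PySem.Dict.empty := rfl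
  rw [hzero, show (((0 : ℕ) : Int) + 1) = 1 from by norm_num] at hsim
  exact hsim
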